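-- pv_equiv track=rewrite | github.com/S8-StudyGroup/Navigate-Basic-Algorithms | NBA_taehak/2022_12/week_1st/72410.py | solution
-- ===== SOURCE A (Python) =====
-- def solution(new_id):
--     # 1, 2, 3
--     condition = {'-', '_'}
--     memo = '.'
--     for char in new_id:
--         if char.isalpha():
--             memo += char.lower()
--         elif char.isdecimal():
--             memo += char
--         elif char in condition:
--             memo += char
--         elif char == '.' and memo[-1] != '.':
--             memo += char
--
--     # 4
--     memo = memo.strip('.')
--
--     # 5
--     if memo == '':
--         memo = 'a'
--
--     # 6
--     if len(memo) >= 16: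
--         memo = memo[:15]
--     memo = memo.rstrip('.')
--
--     # 7
--     while len(memo) < 3:
--         memo += memo[-1]
--
--     return memo
-- ===== SOURCE B (Python) =====
-- def solution(new_id):
--     # pass 1: keep allowed characters, lowering letters
--     kept = ''.join(c.lower() if c.isalpha() else c
--                    for c in new_id
--                    if c.isalpha() or c.isdecimal() or c in '-_.')
--     # pass 2: split on dots and rejoin the non-empty pieces:
--     # this collapses every run of dots to one and strips edge dots at once
--     s = '.'.join(part for part in kept.split('.') if part)
--     if not s:
--         s = 'a'
--     s = s[:15].rstrip('.')
--     # pad to length 3 by repeating the last character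
--     return s + s[-1] * (3 - len(s))
-- ===== Notes on version B (the rewrite author's own statement) =====
-- stated objective: alternative
-- what changed: A's single loop that filters characters and collapses dot runs inline via memo[-1] (with a dot sentinel) is replaced by a filtering comprehension followed by a split-on-dots / rejoin-the-nonempty-pieces pass, which collapses dot runs and strips edge dots in one step; the trailing while-loop padding becomes an arithmetic repeat-last-character append.
import Mathlib
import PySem

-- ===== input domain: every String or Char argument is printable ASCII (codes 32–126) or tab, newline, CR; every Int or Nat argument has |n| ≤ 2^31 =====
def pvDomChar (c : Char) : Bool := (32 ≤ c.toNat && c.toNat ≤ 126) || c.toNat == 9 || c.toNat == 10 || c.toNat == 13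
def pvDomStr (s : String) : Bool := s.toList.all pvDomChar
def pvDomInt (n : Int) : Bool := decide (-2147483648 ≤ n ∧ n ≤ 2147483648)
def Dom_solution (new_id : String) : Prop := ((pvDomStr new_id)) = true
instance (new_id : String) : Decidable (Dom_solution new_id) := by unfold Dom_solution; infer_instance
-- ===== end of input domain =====

-- B replaces A's single combined filter+dot-collapse loop by a character-filter pass followed by a
-- split-on-dots / rejoin-the-nonempty-pieces pass (collapsing dot runs and stripping edge dots at once).

-- ===== PORT A =====
-- s.rstrip('.') (the same Python line occurs in both programs, so the helper is shared); exact for a one-char strip set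
def pvRstripDot (s : List Char) : List Char := (s.reverse.dropWhile (fun c => c == '.')).reverse

-- the body of A's for-loop (memo is never empty: it starts as ['.'])
def pvStepA (memo : List Char) (c : Char) : List Char :=
  if PySem.Chars.isalpha c then memo ++ [PySem.Chars.lowerChar c]
  else if PySem.Chars.isdigit c then memo ++ [c]          -- isdecimal: exact on Dom's ASCII chars
  else if c = '-' ∨ c = '_' then memo ++ [c]              -- char in {'-', '_'}
  else if c = '.' ∧ PySem.List.pyGetD memo (-1) ' ' ≠ '.' then memo ++ [c]
  else memo

-- 'while len(memo) < 3: memo += memo[-1]' (memo is provably nonempty there; appending grows it)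
def pvPad (m : List Char) : List Char :=
  if m.length < 3 then pvPad (m ++ [PySem.List.pyGetD m (-1) 'a']) else m
termination_by 3 - m.length
decreasing_by simp; omega

def solution (new_id : String) : String :=
  let memo := new_id.toList.foldl pvStepA ['.']
  let memo := PySem.Chars.stripChars memo ['.']           -- memo.strip('.')
  let memo := if memo = [] then ['a'] else memo
  let memo := if 16 ≤ memo.length then memo.take 15 else memo   -- memo[:15]; exact for a nonneg literal slice
  let memo := pvRstripDot memo
  String.mk (pvPad memo)

-- ===== PORT B =====
def pvKeep (c : Char) : Bool :=
  PySem.Chars.isalpha c || PySem.Chars.isdigit c || (c == '-' || c == '_' || c == '.')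

def pvMapc (c : Char) : Char := if PySem.Chars.isalpha c then PySem.Chars.lowerChar c else c

def solution_alt (new_id : String) : String :=
  let kept := (new_id.toList.filter pvKeep).map pvMapc    -- the filtering comprehension
  -- '.'.join(part for part in kept.split('.') if part)
  let s := PySem.Chars.join ['.'] ((PySem.Chars.splitOnMax kept ['.'] (-1)).filter (fun p => p ≠ []))
  let s := if s = [] then ['a'] else s
  let s := pvRstripDot (s.take 15)                        -- s[:15].rstrip('.'); take is exact here
  -- s + s[-1] * (3 - len(s)): s is nonempty (proved below); a nonpositive multiplier gives ''
  String.mk (s ++ List.replicate (3 - s.length) (PySem.List.pyGetD s (-1) 'a'))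

-- ===== PRECONDITION & SPEC =====
def Spec_solution (new_id : String) (out : String) : Prop := out = solution_alt new_id
instance (new_id : String) (out : String) : Decidable (Spec_solution new_id out) := by unfold Spec_solution; infer_instance

-- ===== CLAIM (what is proved, stated in full; the proofs are below) =====
def Claim_equal_solution : Prop := ∀ (new_id : String), Dom_solution new_id → Spec_solution new_id (solution new_id)

-- ===== LEMMAS AND PROOFS =====

-- A structural model of A's combined filter+collapse loop (pvG), of split('.') (pvSpl),
-- and of the shape of the collapsed string over the split pieces (pvHT/pvHS).
def pvG : Bool → List Char → List Char
  | _, [] => []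
  | b, c :: xs => if c = '.' then (if b then pvG true xs else '.' :: pvG true xs) else c :: pvG false xs

def pvSpl : List Char → List Char × List (List Char)
  | [] => ([], [])
  | c :: xs => if c = '.' then ([], (pvSpl xs).1 :: (pvSpl xs).2) else (c :: (pvSpl xs).1, (pvSpl xs).2)

def pvHT : List (List Char) → List Char
  | [] => []
  | [] :: ps => pvHT ps
  | (c :: p) :: ps => (c :: p) ++ (match ps with | [] => [] | _ :: _ => '.' :: pvHT ps)

def pvHS : List (List Char) → List Char
  | [] => []
  | ps => '.' :: pvHT ps

lemma pvHT_cons (c : Char) (p : List Char) (ps : List (List Char)) :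
    pvHT ((c :: p) :: ps) = (c :: p) ++ pvHS ps := by cases ps <;> rfl

lemma lowerChar_ne_dot (c : Char) (h : PySem.Chars.isalpha c = true) : PySem.Chars.lowerChar c ≠ '.' := by
  have hT : c.val.toNat = c.toNat := rfl
  simp [PySem.Chars.isalpha, PySem.Chars.isupper, PySem.Chars.islower, Char.le_def,
        UInt32.le_iff_toNat_le, hT] at h
  simp [PySem.Chars.lowerChar, PySem.Chars.isupper, Char.le_def, UInt32.le_iff_toNat_le, hT]
  intro hc
  rcases h with ⟨h1, h2⟩ | ⟨h1, h2⟩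
  · rw [if_pos (by omega)] at hc
    have hv : (Char.ofNat (c.toNat + 32)).toNat = c.toNat + 32 := by
      rw [Char.toNat_ofNat, if_pos]
      exact Or.inl (by omega)
    rw [hc] at hv
    simp at hv; omega
  · rw [if_neg (by omega)] at hc
    have := congrArg Char.toNat hc
    simp at this; omega

lemma digit_ne_dot (c : Char) (h : PySem.Chars.isdigit c = true) : c ≠ '.' := by
  have hT : c.val.toNat = c.toNat := rfl
  simp [PySem.Chars.isdigit, Char.le_def, UInt32.le_iff_toNat_le, hT] at h
  intro hc
  have := congrArg Char.toNat hc
  simp at this; omega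

lemma foldl_stepA (cs : List Char) : ∀ (memo : List Char), memo ≠ [] →
    List.foldl pvStepA memo cs =
      memo ++ pvG (memo.getLast? == some '.') ((cs.filter pvKeep).map pvMapc) := by
  induction cs with
  | nil => intro memo h; simp [pvG]
  | cons c cs ih =>
    intro memo h
    rw [List.foldl_cons]
    by_cases ha : PySem.Chars.isalpha c
    · have hstep : pvStepA memo c = memo ++ [PySem.Chars.lowerChar c] := by
        simp [pvStepA, ha]
      rw [hstep, ih _ (by simp)]
      have hk : pvKeep c = true := by simp [pvKeep, ha]
      have hm : pvMapc c = PySem.Chars.lowerChar c := by simp [pvMapc, ha]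
      have hb : (PySem.Chars.lowerChar c == '.') = false := by
        simp [lowerChar_ne_dot c ha]
      simp [hk, hm, pvG, lowerChar_ne_dot c ha, hb]
    · by_cases hd : PySem.Chars.isdigit c
      · have hstep : pvStepA memo c = memo ++ [c] := by simp [pvStepA, ha, hd]
        rw [hstep, ih _ (by simp)]
        have hk : pvKeep c = true := by simp [pvKeep, hd]
        have hm : pvMapc c = c := by simp [pvMapc, ha]
        have hb : (c == '.') = false := by simp [digit_ne_dot c hd]
        simp [hk, hm, pvG, digit_ne_dot c hd, hb]
      · by_cases hu : c = '-' ∨ c = '_'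
        · have hstep : pvStepA memo c = memo ++ [c] := by simp [pvStepA, ha, hd, hu]
          rw [hstep, ih _ (by simp)]
          have hk : pvKeep c = true := by
            rcases hu with h1 | h1 <;> simp [pvKeep, h1]
          have hm : pvMapc c = c := by simp [pvMapc, ha]
          have hc : c ≠ '.' := by rcases hu with h1 | h1 <;> simp [h1] <;> decide
          have hb : (c == '.') = false := by simp [hc]
          simp [hk, hm, pvG, hc, hb]
        · by_cases hdot : c = '.'
          · subst hdot
            have hlastD : PySem.List.pyGetD memo (-1) ' ' = memo.getLast h :=
              PySem.List.pyGetD_neg_one memo ' ' h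
            have hlq : memo.getLast? = some (memo.getLast h) := List.getLast?_eq_some_getLast h
            by_cases hl : memo.getLast h = '.'
            · have hstep : pvStepA memo '.' = memo := by
                simp [pvStepA, ha, hd, hlastD, hl]
              rw [hstep, ih _ h]
              have hk : pvKeep '.' = true := by decide
              have hm : pvMapc '.' = '.' := by decide
              simp [hk, hm, pvG, hlq, hl]
            · have hstep : pvStepA memo '.' = memo ++ ['.'] := by
                simp [pvStepA, ha, hd, hlastD, hl]
              rw [hstep, ih _ (by simp)]
              have hk : pvKeep '.' = true := by decide
              have hm : pvMapc '.' = '.' := by decide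
              simp [hk, hm, pvG, hlq, hl]
          · have hstep : pvStepA memo c = memo := by
              simp [pvStepA, ha, hd, hu, hdot]
            rw [hstep, ih _ h]
            have hk : pvKeep c = false := by
              simp [pvKeep, ha, hd]
              exact ⟨⟨fun h1 => hu (Or.inl h1), fun h1 => hu (Or.inr h1)⟩, hdot⟩
            simp [hk]

lemma pvG_spl (xs : List Char) :
    pvG true xs = pvHT ((pvSpl xs).1 :: (pvSpl xs).2) ∧
    pvG false xs = (pvSpl xs).1 ++ pvHS (pvSpl xs).2 := by
  induction xs with
  | nil => constructor <;> rfl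
  | cons c xs ih =>
    by_cases hc : c = '.'
    · subst hc
      simp only [pvG, pvSpl, if_pos]
      constructor
      · rw [ih.1]; rfl
      · rw [ih.1]; rfl
    · simp only [pvG, pvSpl, if_neg hc]
      constructor
      · rw [ih.2, pvHT_cons]; rfl
      · rw [ih.2]; rfl

lemma pvSpl_no_dot (xs : List Char) :
    '.' ∉ (pvSpl xs).1 ∧ ∀ p ∈ (pvSpl xs).2, '.' ∉ p := by
  induction xs with
  | nil => simp [pvSpl]
  | cons c xs ih =>
    by_cases hc : c = '.'
    · subst hc
      simp only [pvSpl, if_pos]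
      refine ⟨by simp, ?_⟩
      intro p hp
      rcases List.mem_cons.mp hp with h | h
      · subst h; exact ih.1
      · exact ih.2 p h
    · simp only [pvSpl, if_neg hc]
      refine ⟨?_, ih.2⟩
      intro hm
      rcases List.mem_cons.mp hm with h | h
      · exact hc h.symm
      · exact ih.1 h

lemma splitOn_go_spec : ∀ (l : List Char) (fuel : Nat), l.length < fuel →
    ∀ (cur : List Char) (acc : List (List Char)),
    PySem.Chars.splitOn.go ['.'] fuel l cur acc =
      acc.reverse ++ (cur.reverse ++ (pvSpl l).1) :: (pvSpl l).2 := by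
  intro l
  induction l with
  | nil =>
    intro fuel hf cur acc
    cases fuel with
    | zero => omega
    | succ f => simp [PySem.Chars.splitOn.go, pvSpl]
  | cons c xs ih =>
    intro fuel hf cur acc
    cases fuel with
    | zero => omega
    | succ f =>
      by_cases hc : c = '.'
      · subst hc
        have hpre : List.isPrefixOf ['.'] ('.' :: xs) = true := by simp [List.isPrefixOf]
        rw [PySem.Chars.splitOn.go]
        simp only [hpre, if_pos]
        rw [show List.drop (List.length ['.']) ('.' :: xs) = xs by simp]
        rw [ih f (by simpa using hf) [] (cur.reverse :: acc)]
        simp [pvSpl]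
      · have hpre : List.isPrefixOf ['.'] (c :: xs) = false := by
          simp [List.isPrefixOf]; exact fun h => hc h.symm
        rw [PySem.Chars.splitOn.go]
        simp only [hpre]
        rw [if_neg (by simp)]
        rw [ih f (by simpa using hf) (c :: cur) acc]
        simp [pvSpl, hc]

lemma rstrip_append (u v : List Char) (h : pvRstripDot v ≠ []) :
    pvRstripDot (u ++ v) = u ++ pvRstripDot v := by
  unfold pvRstripDot at h ⊢
  rw [List.reverse_append, List.dropWhile_append]
  have hd : List.dropWhile (fun c => c == '.') v.reverse ≠ [] :=
    fun hh => h (by rw [hh]; rfl)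
  rw [if_neg (by simpa [List.isEmpty_iff] using hd)]
  simp

lemma rstrip_no_dot (t : List Char) (h : '.' ∉ t) : pvRstripDot t = t := by
  unfold pvRstripDot
  have hd : List.dropWhile (fun c => c == '.') t.reverse = t.reverse := by
    rw [List.dropWhile_eq_self_iff]
    intro hh
    have hm : t.reverse[0] ∈ t := List.mem_reverse.mp (List.getElem_mem hh)
    simp only [beq_iff_eq]
    intro he
    exact h (he ▸ hm)
  rw [hd, List.reverse_reverse]

lemma rstrip_append_dot (t : List Char) : pvRstripDot (t ++ ['.']) = pvRstripDot t := by
  unfold pvRstripDot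
  rw [List.reverse_append]
  rw [show (['.'] : List Char).reverse ++ t.reverse = '.' :: t.reverse from rfl]
  rw [List.dropWhile_cons_of_pos (by decide)]

lemma rstrip_nil_all_dot (t : List Char) (h : pvRstripDot t = []) : ∀ x ∈ t, x = '.' := by
  unfold pvRstripDot at h
  rw [List.reverse_eq_nil_iff, List.dropWhile_eq_nil_iff] at h
  intro x hx
  simpa using h x (List.mem_reverse.mpr hx)

lemma pvInter_cons2 (x y : List Char) (zs : List (List Char)) :
    ['.'].intercalate (x :: y :: zs) = x ++ '.' :: ['.'].intercalate (y :: zs) := by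
  simp [List.intercalate]

lemma intercalate_cons_shape (q : List Char) (qs : List (List Char)) :
    ∃ t, List.intercalate ['.'] (q :: qs) = q ++ t := by
  cases qs with
  | nil => exact ⟨[], by simp [List.intercalate]⟩
  | cons r rs => exact ⟨'.' :: List.intercalate ['.'] (r :: rs), pvInter_cons2 q r rs⟩

lemma pvHT_nil_of_all_nil (ps : List (List Char)) (h : ∀ p ∈ ps, p = []) : pvHT ps = [] := by
  induction ps with
  | nil => rfl
  | cons p ps ih =>
    have hp := h p (by simp)
    subst hp
    exact ih (fun q hq => h q (by simp [hq]))

lemma pieces_main (ps : List (List Char)) (h : ∀ p ∈ ps, '.' ∉ p) :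
    pvRstripDot (pvHT ps) = List.intercalate ['.'] (ps.filter (fun p => p ≠ [])) := by
  induction ps with
  | nil => simp [pvHT, pvRstripDot, List.intercalate]
  | cons p ps ih =>
    cases p with
    | nil =>
      show pvRstripDot (pvHT ([] :: ps)) = _
      rw [show pvHT ([] :: ps) = pvHT ps from rfl]
      rw [ih (fun q hq => h q (by simp [hq]))]
      simp
    | cons a p =>
      have hap : '.' ∉ a :: p := h _ (by simp)
      have hfp : List.filter (fun p => decide (p ≠ [])) ((a :: p) :: ps)
          = (a :: p) :: List.filter (fun p => decide (p ≠ [])) ps := by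
        simp
      rw [pvHT_cons, hfp]
      by_cases hops : List.filter (fun p => decide (p ≠ [])) ps = []
      · have hnil : pvHT ps = [] := by
          apply pvHT_nil_of_all_nil
          intro q hq
          by_contra hne
          have : q ∈ List.filter (fun p => decide (p ≠ [])) ps :=
            List.mem_filter.mpr ⟨hq, by simp [hne]⟩
          rw [hops] at this
          simp at this
        rw [hops]
        have hr : pvRstripDot ((a :: p) ++ pvHS ps) = a :: p := by
          cases ps with
          | nil => simpa [pvHS] using rstrip_no_dot _ hap
          | cons r rs =>
            show pvRstripDot ((a :: p) ++ '.' :: pvHT (r :: rs)) = a :: p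
            rw [hnil]
            rw [show (a :: p) ++ '.' :: ([] : List Char) = (a :: p) ++ ['.'] from rfl]
            rw [rstrip_append_dot]
            exact rstrip_no_dot _ hap
        rw [hr]
        simp [List.intercalate]
      · rcases List.exists_cons_of_ne_nil hops with ⟨q, qs, hqqs⟩
        have hps_ne : ps ≠ [] := by
          intro hps; rw [hps] at hops; simp at hops
        have hrec : pvRstripDot (pvHT ps) = List.intercalate ['.'] (q :: qs) := by
          rw [ih (fun r hr => h r (by simp [hr])), hqqs]
        have hq_ne : q ≠ [] := by
          have : q ∈ List.filter (fun p => decide (p ≠ [])) ps := by rw [hqqs]; simp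
          simpa using (List.mem_filter.mp this).2
        have hint_ne : List.intercalate ['.'] (q :: qs) ≠ [] := by
          rcases intercalate_cons_shape q qs with ⟨t, ht⟩
          rw [ht]
          intro hc
          exact hq_ne (by simpa using (List.append_eq_nil_iff.mp hc).1)
        have hHS : pvHS ps = '.' :: pvHT ps := by
          cases ps with
          | nil => exact absurd rfl hps_ne
          | cons r rs => rfl
        rw [hHS]
        have hrd_ne : pvRstripDot (pvHT ps) ≠ [] := by rw [hrec]; exact hint_ne
        have hdot_ne : pvRstripDot ('.' :: pvHT ps) = '.' :: pvRstripDot (pvHT ps) := by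
          simpa using rstrip_append ['.'] (pvHT ps) hrd_ne
        rw [rstrip_append (a :: p) ('.' :: pvHT ps) (by rw [hdot_ne]; simp)]
        rw [hdot_ne, hrec, hqqs, pvInter_cons2]

lemma pvHT_head_ne_dot (ps : List (List Char)) (h : ∀ p ∈ ps, '.' ∉ p) :
    ∀ c t, pvHT ps = c :: t → c ≠ '.' := by
  induction ps with
  | nil => intro c t hc; simp [pvHT] at hc
  | cons p ps ih =>
    cases p with
    | nil => exact fun c t hc => ih (fun q hq => h q (by simp [hq])) c t hc
    | cons a p =>
      intro c t hc
      rw [pvHT_cons] at hc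
      have : c = a := by simpa using congrArg (List.head? ·) hc.symm
      subst this
      exact fun hd => h (c :: p) (by simp) (by simp [hd])

lemma pad_eq (m : List Char) (h : m ≠ []) :
    pvPad m = m ++ List.replicate (3 - m.length) (PySem.List.pyGetD m (-1) 'a') := by
  match m, h with
  | [a], _ =>
    have g1 : PySem.List.pyGetD [a] (-1) 'a' = a :=
      PySem.List.pyGetD_neg_one_append_singleton (xs := []) (x := a) (d := 'a')
    have g2 : PySem.List.pyGetD [a, a] (-1) 'a' = a :=
      PySem.List.pyGetD_neg_one_append_singleton (xs := [a]) (x := a) (d := 'a')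
    rw [pvPad, if_pos (by simp), g1]
    rw [pvPad]
    simp only [List.cons_append, List.nil_append]
    rw [if_pos (by simp), g2]
    rw [pvPad, if_neg (by simp)]
    simp
  | [a, b], _ =>
    have g2 : PySem.List.pyGetD [a, b] (-1) 'a' = b :=
      PySem.List.pyGetD_neg_one_append_singleton (xs := [a]) (x := b) (d := 'a')
    rw [pvPad, if_pos (by simp), g2]
    rw [pvPad, if_neg (by simp)]
    simp
  | a :: b :: c :: t, _ =>
    rw [pvPad, if_neg (by simp)]
    have : 3 - (a :: b :: c :: t).length = 0 := by simp
    rw [this]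
    simp

-- the two mid-pipeline values ('memo' after step 4 in A, 's' after the join in B) agree
lemma dotfree_pieces (F : List Char) : ∀ p ∈ (pvSpl F).1 :: (pvSpl F).2, '.' ∉ p := by
  intro p hp
  rcases List.mem_cons.mp hp with h | h
  · subst h; exact (pvSpl_no_dot F).1
  · exact (pvSpl_no_dot F).2 p h

lemma a_mid (F : List Char) :
    PySem.Chars.stripChars (['.'] ++ pvG true F) ['.'] =
      List.intercalate ['.'] (((pvSpl F).1 :: (pvSpl F).2).filter (fun p => p ≠ [])) := by
  have hg := (pvG_spl F).1
  unfold PySem.Chars.stripChars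
  have hf : (fun c => List.contains ['.'] c) = (fun c : Char => c == '.') := by
    funext c; by_cases h : c = '.' <;> simp [h]
  rw [hf]
  show (List.dropWhile (fun c : Char => c == '.')
      (List.dropWhile (fun c : Char => c == '.') ('.' :: pvG true F)).reverse).reverse = _
  rw [List.dropWhile_cons_of_pos (by decide)]
  have hdw : List.dropWhile (fun c : Char => c == '.') (pvG true F) = pvG true F := by
    cases hG : pvG true F with
    | nil => rfl
    | cons c t =>
      have hc : c ≠ '.' := pvHT_head_ne_dot _ (dotfree_pieces F) c t (by rw [← hg, hG])
      rw [List.dropWhile_cons_of_neg (by simp [hc])]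
  rw [hdw]
  rw [show (List.dropWhile (fun c : Char => c == '.') (pvG true F).reverse).reverse
      = pvRstripDot (pvG true F) from rfl]
  rw [hg, pieces_main _ (dotfree_pieces F)]

lemma b_mid (F : List Char) :
    PySem.Chars.join ['.'] ((PySem.Chars.splitOnMax F ['.'] (-1)).filter (fun p => p ≠ [])) =
      List.intercalate ['.'] (((pvSpl F).1 :: (pvSpl F).2).filter (fun p => p ≠ [])) := by
  have h1 : PySem.Chars.splitOnMax F ['.'] (-1) = PySem.Chars.splitOn F ['.'] := by
    simp [PySem.Chars.splitOnMax]
  have h2 : PySem.Chars.splitOn F ['.'] = (pvSpl F).1 :: (pvSpl F).2 := by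
    unfold PySem.Chars.splitOn
    simpa using splitOn_go_spec F (F.length + 1) (by omega) [] []
  rw [h1, h2]
  rfl

-- the string entering the final padding is nonempty (its head is never '.')
lemma mid_head (F : List Char) :
    List.intercalate ['.'] (((pvSpl F).1 :: (pvSpl F).2).filter (fun p => p ≠ [])) = [] ∨
    ∃ c t, List.intercalate ['.'] (((pvSpl F).1 :: (pvSpl F).2).filter (fun p => p ≠ [])) = c :: t ∧ c ≠ '.' := by
  cases hft : ((pvSpl F).1 :: (pvSpl F).2).filter (fun p => p ≠ []) with
  | nil => left; simp [List.intercalate]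
  | cons q qs =>
    right
    have hqm : q ∈ ((pvSpl F).1 :: (pvSpl F).2).filter (fun p => p ≠ []) := by rw [hft]; simp
    have hq_ne : q ≠ [] := by simpa using (List.mem_filter.mp hqm).2
    have hq_nd : '.' ∉ q := dotfree_pieces F q (List.mem_of_mem_filter hqm)
    rcases List.exists_cons_of_ne_nil hq_ne with ⟨c, p, hcp⟩
    rcases intercalate_cons_shape q qs with ⟨t, ht⟩
    refine ⟨c, p ++ t, ?_, ?_⟩
    · rw [ht, hcp]; rfl
    · intro hc; exact hq_nd (by rw [hcp, hc]; simp)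

lemma m4_ne (M : List Char) (hM : M = [] ∨ ∃ c t, M = c :: t ∧ c ≠ '.') :
    pvRstripDot ((if M = [] then ['a'] else M).take 15) ≠ [] := by
  intro hnil
  have hall := rstrip_nil_all_dot _ hnil
  rcases hM with h | ⟨c, t, hct, hc⟩
  · subst h
    simp at hall
  · rw [if_neg (by simp [hct]), hct] at hall
    exact hc (hall c (by simp))

-- ===== VERDICT (by name: the statement is the Claim_ definition above) =====
theorem solution_spec : Claim_equal_solution := by
  intro new_id _
  unfold Spec_solution
  simp only [solution, solution_alt]
  rw [foldl_stepA new_id.toList ['.'] (by simp)]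
  rw [show ((['.'] : List Char).getLast? == some '.') = true from rfl]
  rw [a_mid, b_mid]
  set M := List.intercalate ['.']
    (((pvSpl ((new_id.toList.filter pvKeep).map pvMapc)).1 ::
      (pvSpl ((new_id.toList.filter pvKeep).map pvMapc)).2).filter (fun p => p ≠ [])) with hMdef
  have htake : (if 16 ≤ (if M = [] then ['a'] else M).length
      then (if M = [] then ['a'] else M).take 15 else (if M = [] then ['a'] else M))
      = (if M = [] then ['a'] else M).take 15 := by
    by_cases h1 : 16 ≤ (if M = [] then ['a'] else M).length
    · rw [if_pos h1]
    · rw [if_neg h1]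
      exact (List.take_of_length_le (by omega)).symm
  rw [htake]
  rw [pad_eq _ (m4_ne M (hMdef ▸ mid_head _))]
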